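-- pv_equiv track=rewrite | github.com/valdineifer/python-gantt-chart-test | main.py | get_range_list
-- ===== SOURCE A (Python) =====
-- def get_range_list(start, end, last):
--     for i in range(last):
--         if i <= start:
--             yield start
--         elif i <= end:
--             yield i
--         else:
--             yield end
-- ===== SOURCE B (Python) =====
-- def get_range_list(start, end, last):
--     # three sequential phases: constant start, the ramp, constant end
--     p1 = min(max(start + 1, 0), last)
--     p2 = min(max(end + 1, p1), last)
--     for _ in range(p1):
--         yield start
--     for i in range(p1, p2):
--         yield i
--     for _ in range(p2, last):
--         yield end
-- ===== Notes on version B (the rewrite author's own statement) =====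
-- stated objective: alternative
-- what changed: Replaced the per-index branch chain inside one loop by precomputing the two phase boundaries p1=clamp(start+1,0,last) and p2=clamp(end+1,p1,last) and emitting three sequential runs (constant start, the ramp itself, constant end) with no per-element comparisons.
import Mathlib
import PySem

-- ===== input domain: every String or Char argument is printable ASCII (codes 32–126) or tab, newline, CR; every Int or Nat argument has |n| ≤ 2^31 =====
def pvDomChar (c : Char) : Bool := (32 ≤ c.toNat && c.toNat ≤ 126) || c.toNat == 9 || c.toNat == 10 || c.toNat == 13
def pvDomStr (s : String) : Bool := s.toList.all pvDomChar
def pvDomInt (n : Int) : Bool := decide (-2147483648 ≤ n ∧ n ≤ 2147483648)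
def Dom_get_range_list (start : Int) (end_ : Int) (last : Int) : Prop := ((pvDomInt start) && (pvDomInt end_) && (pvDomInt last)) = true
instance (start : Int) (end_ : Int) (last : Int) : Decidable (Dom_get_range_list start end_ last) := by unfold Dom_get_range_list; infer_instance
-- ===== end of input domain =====

-- B replaces the per-index branch chain by three precomputed phases (constant start, ramp, constant end); same cost, different decomposition.


-- ===== PORT A =====
-- Port of A: one pass over range(last), each index mapped through the branch chain.
def get_range_list (start : Int) (end_ : Int) (last : Int) : List Int :=
  (PySem.List.pyRange 0 last 1).map (fun i =>
    if i ≤ start then start else if i ≤ end_ then i else end_)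

-- ===== PORT B =====
-- Port of B: three sequential phases with precomputed boundaries p1 ≤ p2.
def get_range_list_alt (start : Int) (end_ : Int) (last : Int) : List Int :=
  let p1 := min (max (start + 1) 0) last
  let p2 := min (max (end_ + 1) p1) last
  (PySem.List.pyRange 0 p1 1).map (fun _ => start)
    ++ PySem.List.pyRange p1 p2 1
    ++ (PySem.List.pyRange p2 last 1).map (fun _ => end_)

-- ===== PRECONDITION & SPEC =====
def Spec_get_range_list (start : Int) (end_ : Int) (last : Int) (out : List Int) : Prop := out = get_range_list_alt start end_ last
instance (start : Int) (end_ : Int) (last : Int) (out : List Int) : Decidable (Spec_get_range_list start end_ last out) := by unfold Spec_get_range_list; infer_instance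

-- ===== CLAIM (what is proved, stated in full; the proofs are below) =====
def Claim_equal_get_range_list : Prop := ∀ (start : Int) (end_ : Int) (last : Int), Dom_get_range_list start end_ last → Spec_get_range_list start end_ last (get_range_list start end_ last)

-- ===== LEMMAS AND PROOFS =====

-- ===== VERDICT (by name: the statement is the Claim_ definition above) =====
theorem get_range_list_spec : Claim_equal_get_range_list := by
  intro start end_ last _
  unfold Spec_get_range_list get_range_list get_range_list_alt
  by_cases hl : last ≤ 0
  · have h1 : min (max (start + 1) 0) last = last := by omega
    have h2 : min (max (end_ + 1) (min (max (start + 1) 0) last)) last = last := by omega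
    simp [h1, PySem.List.pyRange_one_eq_nil hl, PySem.List.pyRange_one_eq_nil (le_refl last)]
  · set p1 := min (max (start + 1) 0) last with hp1
    set p2 := min (max (end_ + 1) p1) last with hp2
    have h0p1 : (0:Int) ≤ p1 := by omega
    have hp1p2 : p1 ≤ p2 := by omega
    have hp2l : p2 ≤ last := by omega
    have e1 : (PySem.List.pyRange 0 p1 1).map
        (fun i => if i ≤ start then start else if i ≤ end_ then i else end_)
        = (PySem.List.pyRange 0 p1 1).map (fun _ => start) := by
      apply List.map_congr_left
      intro i hi
      rw [PySem.List.mem_pyRange_one] at hi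
      have : i ≤ start := by omega
      simp [this]
    have e2 : (PySem.List.pyRange p1 p2 1).map
        (fun i => if i ≤ start then start else if i ≤ end_ then i else end_)
        = PySem.List.pyRange p1 p2 1 := by
      have : (PySem.List.pyRange p1 p2 1).map
          (fun i => if i ≤ start then start else if i ≤ end_ then i else end_)
          = (PySem.List.pyRange p1 p2 1).map (fun i => i) := by
        apply List.map_congr_left
        intro i hi
        rw [PySem.List.mem_pyRange_one] at hi
        have h1 : ¬ i ≤ start := by omega
        have h2 : i ≤ end_ := by omega
        simp [h1, h2]
      simpa using this
    have e3 : (PySem.List.pyRange p2 last 1).map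
        (fun i => if i ≤ start then start else if i ≤ end_ then i else end_)
        = (PySem.List.pyRange p2 last 1).map (fun _ => end_) := by
      apply List.map_congr_left
      intro i hi
      rw [PySem.List.mem_pyRange_one] at hi
      have h1 : ¬ i ≤ start := by omega
      have h2 : ¬ i ≤ end_ := by omega
      simp [h1, h2]
    rw [PySem.List.pyRange_one_append 0 p1 last h0p1 (le_trans hp1p2 hp2l),
        PySem.List.pyRange_one_append p1 p2 last hp1p2 hp2l, List.map_append, List.map_append,
        e1, e2, e3]
    simp [List.append_assoc, ← hp2]
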